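-- pv_equiv track=rewrite | github.com/romeorizzi/portafoglioVoti_public | Algoritmi/2022-07-26/all-CMS-submissions-2022-07-26/20220726T091721.VR472021.incr_subseq_with_drops.py | fun_max
-- ===== SOURCE A (Python) =====
-- def fun_max(l,k,x):
--     if len(l) == 0:
--         return 0
--
--     if k == 0:
--         if x < l[0]:
--             c = fun_max(l[1:],k,l[0]) + 1
--         else:
--             c = 0
--
--         return max(c, fun_max(l[1:],k,x))
--
--     c1=0
--     c2=0
--     if x < l[0]:
--         c1 = fun_max(l[1:],k,l[0]) + 1
--     else:
--         c2 = fun_max(l[1:],k-1,l[0]) + 1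
--     c = max(c1,c2)
--
--     return max(c, fun_max(l[1:],k,x))
-- ===== SOURCE B (Python) =====
-- def fun_max(l, k, x):
--     # Memoized top-down DP over (index, remaining drops, last value):
--     # same recurrence as the naive recursion, each state computed once.
--     n = len(l)
--     memo = {}
--
--     def go(i, k, x):
--         if i == n:
--             return 0
--         key = (i, k, x)
--         if key in memo:
--             return memo[key]
--         h = l[i]
--         if k == 0:
--             if x < h:
--                 c = go(i + 1, k, h) + 1
--             else:
--                 c = 0
--         else:
--             if x < h:
--                 c = go(i + 1, k, h) + 1
--             else:
--                 c = go(i + 1, k - 1, h) + 1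
--         res = max(c, go(i + 1, k, x))
--         memo[key] = res
--         return res
--
--     return go(0, k, x)
-- ===== Notes on version B (the rewrite author's own statement) =====
-- stated objective: faster
-- what changed: Replaced the exponential naive recursion with a memoized top-down DP over (index, remaining drops, last value), computing each state once.
import Mathlib
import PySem

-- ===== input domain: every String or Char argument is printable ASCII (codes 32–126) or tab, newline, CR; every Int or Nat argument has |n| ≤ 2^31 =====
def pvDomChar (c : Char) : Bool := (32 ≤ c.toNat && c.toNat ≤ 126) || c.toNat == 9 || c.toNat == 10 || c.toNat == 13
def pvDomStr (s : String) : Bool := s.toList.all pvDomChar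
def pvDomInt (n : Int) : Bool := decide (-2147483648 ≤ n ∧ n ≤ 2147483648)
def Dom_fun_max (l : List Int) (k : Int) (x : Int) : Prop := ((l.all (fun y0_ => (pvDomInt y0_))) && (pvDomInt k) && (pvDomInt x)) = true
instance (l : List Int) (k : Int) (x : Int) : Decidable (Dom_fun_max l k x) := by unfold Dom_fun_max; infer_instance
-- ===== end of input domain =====

-- B replaces A's exponential naive recursion by a memoized top-down DP over
-- (index, remaining drops, last value), computing each state once (objective: faster).

-- ===== PORT A =====
def fun_max (l : List Int) (k : Int) (x : Int) : Int :=
  match l with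
  | [] => 0
  | h :: t =>
    if k == 0 then
      let c : Int := if x < h then fun_max t k h + 1 else 0
      max c (fun_max t k x)
    else
      -- c1 = 0; c2 = 0; then exactly one is overwritten
      let c1 : Int := if x < h then fun_max t k h + 1 else 0
      let c2 : Int := if x < h then 0 else fun_max t (k - 1) h + 1
      let c : Int := max c1 c2
      max c (fun_max t k x)

-- ===== PORT B =====
-- `go` of Source B: the remaining suffix of l is carried explicitly (it is l[i:], so
-- its head is l[i]); the memo dict is threaded through and returned.
def fmGo (rest : List Int) (i : Int) (k : Int) (x : Int)
    (d : PySem.Dict (Int × Int × Int) Int) : Int × PySem.Dict (Int × Int × Int) Int :=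
  match rest with
  | [] => (0, d)
  | h :: t =>
    match d.get? (i, k, x) with
    | some v => (v, d)
    | none =>
      let cd :=
        if k == 0 then
          if x < h then
            let p := fmGo t (i + 1) k h d
            (p.1 + 1, p.2)
          else ((0 : Int), d)
        else
          if x < h then
            let p := fmGo t (i + 1) k h d
            (p.1 + 1, p.2)
          else
            let p := fmGo t (i + 1) (k - 1) h d
            (p.1 + 1, p.2)
      let q := fmGo t (i + 1) k x cd.2
      let res := max cd.1 q.1
      (res, q.2.insert (i, k, x) res)

def fun_max_alt (l : List Int) (k : Int) (x : Int) : Int :=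
  (fmGo l 0 k x PySem.Dict.empty).1

-- ===== PRECONDITION & SPEC =====
def Spec_fun_max (l : List Int) (k : Int) (x : Int) (out : Int) : Prop := out = fun_max_alt l k x
instance (l : List Int) (k : Int) (x : Int) (out : Int) : Decidable (Spec_fun_max l k x out) := by unfold Spec_fun_max; infer_instance

-- ===== CLAIM (what is proved, stated in full; the proofs are below) =====
def Claim_equal_fun_max : Prop := ∀ (l : List Int) (k : Int) (x : Int), Dom_fun_max l k x → Spec_fun_max l k x (fun_max l k x)

-- ===== LEMMAS AND PROOFS =====

theorem fun_max_nonneg (l : List Int) (k x : Int) : 0 ≤ fun_max l k x := by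
  induction l generalizing k x with
  | nil => simp [fun_max]
  | cons h t ih =>
    simp only [fun_max]
    split <;> exact le_trans (ih k x) (le_max_right _ _)

-- memo invariant: every stored value is the naive recursion's value for its state
def fmInv (l0 : List Int) (d : PySem.Dict (Int × Int × Int) Int) : Prop :=
  ∀ (i k x v : Int), d.get? (i, k, x) = some v → v = fun_max (l0.drop i.toNat) k x

theorem fmInv_empty (l0 : List Int) : fmInv l0 PySem.Dict.empty := by
  intro i k x v h
  simp [PySem.Dict.get?_empty] at h

theorem fmGo_correct (l0 : List Int) (rest : List Int) :
    ∀ (i k x : Int) (d : PySem.Dict (Int × Int × Int) Int),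
      0 ≤ i → rest = l0.drop i.toNat → fmInv l0 d →
      (fmGo rest i k x d).1 = fun_max rest k x ∧ fmInv l0 (fmGo rest i k x d).2 := by
  induction rest with
  | nil =>
    intro i k x d _ _ hinv
    exact ⟨rfl, hinv⟩
  | cons h t ih =>
    intro i k x d hi hdrop hinv
    have ht : t = l0.drop (i + 1).toNat := by
      have h1 : (i + 1).toNat = i.toNat + 1 := by omega
      rw [h1, ← List.drop_drop, ← hdrop]
      simp
    cases hget : d.get? (i, k, x) with
    | some v =>
      have hv : v = fun_max (h :: t) k x := by
        rw [hinv i k x v hget, ← hdrop]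
      simp only [fmGo, hget]
      exact ⟨hv, hinv⟩
    | none =>
      have hi1 : (0 : Int) ≤ i + 1 := by omega
      by_cases hk : k == 0
      · by_cases hx : x < h
        · obtain ⟨e1, inv1⟩ := ih (i + 1) k h d hi1 ht hinv
          obtain ⟨e2, inv2⟩ := ih (i + 1) k x (fmGo t (i + 1) k h d).2 hi1 ht inv1
          have hA : fun_max (h :: t) k x = max (fun_max t k h + 1) (fun_max t k x) := by
            simp [fun_max, hk, hx]
          have hstep : fmGo (h :: t) i k x d
              = (max ((fmGo t (i + 1) k h d).1 + 1)
                    ((fmGo t (i + 1) k x (fmGo t (i + 1) k h d).2).1),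
                 ((fmGo t (i + 1) k x (fmGo t (i + 1) k h d).2).2).insert (i, k, x)
                   (max ((fmGo t (i + 1) k h d).1 + 1)
                     ((fmGo t (i + 1) k x (fmGo t (i + 1) k h d).2).1))) := by
            simp [fmGo, hget, hk, hx]
          rw [hstep]
          refine ⟨by simp [e1, e2, hA], ?_⟩
          intro i' k' x' v' hg
          rw [PySem.Dict.get?_insert] at hg
          split at hg
          · rename_i heq
            rw [Prod.mk.injEq] at heq
            obtain ⟨rfl, heq2⟩ := heq
            rw [Prod.mk.injEq] at heq2
            obtain ⟨rfl, rfl⟩ := heq2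
            rw [Option.some.injEq] at hg
            rw [← hg, ← hdrop, hA, e1, e2]
          · exact inv2 i' k' x' v' hg
        · obtain ⟨e2, inv2⟩ := ih (i + 1) k x d hi1 ht hinv
          have hA : fun_max (h :: t) k x = max 0 (fun_max t k x) := by
            simp [fun_max, hk, hx]
          have hstep : fmGo (h :: t) i k x d
              = (max 0 ((fmGo t (i + 1) k x d).1),
                 ((fmGo t (i + 1) k x d).2).insert (i, k, x)
                   (max 0 ((fmGo t (i + 1) k x d).1))) := by
            simp [fmGo, hget, hk, hx]
          rw [hstep]
          refine ⟨by simp [e2, hA], ?_⟩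
          intro i' k' x' v' hg
          rw [PySem.Dict.get?_insert] at hg
          split at hg
          · rename_i heq
            rw [Prod.mk.injEq] at heq
            obtain ⟨rfl, heq2⟩ := heq
            rw [Prod.mk.injEq] at heq2
            obtain ⟨rfl, rfl⟩ := heq2
            rw [Option.some.injEq] at hg
            rw [← hg, ← hdrop, hA, e2]
          · exact inv2 i' k' x' v' hg
      · by_cases hx : x < h
        · obtain ⟨e1, inv1⟩ := ih (i + 1) k h d hi1 ht hinv
          obtain ⟨e2, inv2⟩ := ih (i + 1) k x (fmGo t (i + 1) k h d).2 hi1 ht inv1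
          have hc : max (fun_max t k h + 1) (0 : Int) = fun_max t k h + 1 :=
            max_eq_left (by have := fun_max_nonneg t k h; omega)
          have hA : fun_max (h :: t) k x = max (fun_max t k h + 1) (fun_max t k x) := by
            simp [fun_max, hk, hx, hc]
          have hstep : fmGo (h :: t) i k x d
              = (max ((fmGo t (i + 1) k h d).1 + 1)
                    ((fmGo t (i + 1) k x (fmGo t (i + 1) k h d).2).1),
                 ((fmGo t (i + 1) k x (fmGo t (i + 1) k h d).2).2).insert (i, k, x)
                   (max ((fmGo t (i + 1) k h d).1 + 1)
                     ((fmGo t (i + 1) k x (fmGo t (i + 1) k h d).2).1))) := by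
            simp [fmGo, hget, hk, hx]
          rw [hstep]
          refine ⟨by simp [e1, e2, hA], ?_⟩
          intro i' k' x' v' hg
          rw [PySem.Dict.get?_insert] at hg
          split at hg
          · rename_i heq
            rw [Prod.mk.injEq] at heq
            obtain ⟨rfl, heq2⟩ := heq
            rw [Prod.mk.injEq] at heq2
            obtain ⟨rfl, rfl⟩ := heq2
            rw [Option.some.injEq] at hg
            rw [← hg, ← hdrop, hA, e1, e2]
          · exact inv2 i' k' x' v' hg
        · obtain ⟨e1, inv1⟩ := ih (i + 1) (k - 1) h d hi1 ht hinv
          obtain ⟨e2, inv2⟩ := ih (i + 1) k x (fmGo t (i + 1) (k - 1) h d).2 hi1 ht inv1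
          have hc : max (0 : Int) (fun_max t (k - 1) h + 1) = fun_max t (k - 1) h + 1 :=
            max_eq_right (by have := fun_max_nonneg t (k - 1) h; omega)
          have hA : fun_max (h :: t) k x = max (fun_max t (k - 1) h + 1) (fun_max t k x) := by
            simp [fun_max, hk, hx, hc]
          have hstep : fmGo (h :: t) i k x d
              = (max ((fmGo t (i + 1) (k - 1) h d).1 + 1)
                    ((fmGo t (i + 1) k x (fmGo t (i + 1) (k - 1) h d).2).1),
                 ((fmGo t (i + 1) k x (fmGo t (i + 1) (k - 1) h d).2).2).insert (i, k, x)
                   (max ((fmGo t (i + 1) (k - 1) h d).1 + 1)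
                     ((fmGo t (i + 1) k x (fmGo t (i + 1) (k - 1) h d).2).1))) := by
            simp [fmGo, hget, hk, hx]
          rw [hstep]
          refine ⟨by simp [e1, e2, hA], ?_⟩
          intro i' k' x' v' hg
          rw [PySem.Dict.get?_insert] at hg
          split at hg
          · rename_i heq
            rw [Prod.mk.injEq] at heq
            obtain ⟨rfl, heq2⟩ := heq
            rw [Prod.mk.injEq] at heq2
            obtain ⟨rfl, rfl⟩ := heq2
            rw [Option.some.injEq] at hg
            rw [← hg, ← hdrop, hA, e1, e2]
          · exact inv2 i' k' x' v' hg

-- ===== VERDICT (by name: the statement is the Claim_ definition above) =====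
theorem fun_max_spec : Claim_equal_fun_max := by
  intro l k x _
  unfold Spec_fun_max fun_max_alt
  have := (fmGo_correct l l 0 k x PySem.Dict.empty le_rfl (by simp) (fmInv_empty l)).1
  rw [this]
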